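-- pv_equiv track=rewrite | github.com/HyoMiYing/dejans-homework | dejanova_naloga.py | odsek
-- ===== SOURCE A (Python) =====
-- slovar_smeri = {
--     '<' : (-1, 0),
--     '>' : (1, 0),
--     '^' : (0, 1),
--     'v' : (0, -1),
-- }
--
-- def odsek(x_koordinata, y_koordinata, smerni_znak, razdalja_potovanja):
--     seznam_terk = [(x_koordinata, y_koordinata)]
--     for korak in range(int(razdalja_potovanja)):
--         for index, element_terke in enumerate(slovar_smeri[smerni_znak]):
--             if index == 0:
--                x_koordinata = x_koordinata + element_terke
--             elif index == 1:
--                y_koordinata = y_koordinata + element_terke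
--         seznam_terk.append((x_koordinata, y_koordinata))
--     return seznam_terk
-- ===== SOURCE B (Python) =====
-- slovar_smeri = {
--     '<' : (-1, 0),
--     '>' : (1, 0),
--     '^' : (0, 1),
--     'v' : (0, -1),
-- }
--
-- def odsek(x_koordinata, y_koordinata, smerni_znak, razdalja_potovanja):
--     n = int(razdalja_potovanja)
--     tocke = [(x_koordinata, y_koordinata)]
--     if n > 0:
--         dx, dy = slovar_smeri[smerni_znak]
--         tocke += [(x_koordinata + i * dx, y_koordinata + i * dy)
--                   for i in range(1, n + 1)]
--     return tocke
-- ===== Notes on version B (the rewrite author's own statement) =====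
-- stated objective: idiomatic
-- what changed: Replaces the running accumulation with one enumerate-over-tuple index dispatch per step by a single lookup of (dx, dy) and one comprehension computing point i in closed form as (x + i*dx, y + i*dy).
import Mathlib
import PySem

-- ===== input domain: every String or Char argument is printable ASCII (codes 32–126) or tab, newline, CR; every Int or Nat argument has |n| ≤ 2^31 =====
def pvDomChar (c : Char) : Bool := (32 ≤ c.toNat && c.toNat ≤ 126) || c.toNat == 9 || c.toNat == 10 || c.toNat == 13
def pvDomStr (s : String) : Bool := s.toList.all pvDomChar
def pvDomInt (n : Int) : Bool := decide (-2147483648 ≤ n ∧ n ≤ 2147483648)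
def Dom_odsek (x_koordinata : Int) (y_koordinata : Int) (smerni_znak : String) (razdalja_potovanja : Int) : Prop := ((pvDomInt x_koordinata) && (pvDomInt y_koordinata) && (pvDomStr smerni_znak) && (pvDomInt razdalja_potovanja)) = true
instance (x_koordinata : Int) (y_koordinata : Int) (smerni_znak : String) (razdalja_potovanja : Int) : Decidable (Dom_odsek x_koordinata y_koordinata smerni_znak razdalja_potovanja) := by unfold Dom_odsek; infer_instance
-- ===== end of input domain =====

-- B replaces A's step-by-step accumulation (with enumerate-over-tuple index dispatch)
-- by one direction lookup and a closed-form comprehension (x + i*dx, y + i*dy); objective: idiomatic.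


-- ===== PORT A =====
def slovarSmeri : PySem.Dict String (Int × Int) :=
  PySem.Dict.ofList [("<", (-1, 0)), (">", (1, 0)), ("^", (0, 1)), ("v", (0, -1))]

-- one loop iteration of A: look the direction tuple up, add its two components
-- (the enumerate-over-the-pair with index dispatch unrolls to 'add dx, then add dy'),
-- append the new point; 'none' (Python: KeyError) is excluded by Pre_odsek
def korakA (smerni_znak : String) (st : Int × Int × List (Int × Int)) (_korak : Int) :
    Int × Int × List (Int × Int) :=
  match PySem.Dict.get? slovarSmeri smerni_znak with
  | none => st
  | some (dx, dy) => (st.1 + dx, st.2.1 + dy, st.2.2 ++ [(st.1 + dx, st.2.1 + dy)])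

def odsek (x_koordinata : Int) (y_koordinata : Int) (smerni_znak : String) (razdalja_potovanja : Int) : List (Int × Int) :=
  ((PySem.List.pyRange 0 razdalja_potovanja 1).foldl (korakA smerni_znak)
    (x_koordinata, y_koordinata, [(x_koordinata, y_koordinata)])).2.2

-- ===== PORT B =====
def odsek_alt (x_koordinata : Int) (y_koordinata : Int) (smerni_znak : String) (razdalja_potovanja : Int) : List (Int × Int) :=
  let tocke : List (Int × Int) := [(x_koordinata, y_koordinata)]
  if razdalja_potovanja > 0 then
    match PySem.Dict.get? slovarSmeri smerni_znak with
    | none => tocke  -- Python: KeyError; excluded by Pre_odsek when razdalja_potovanja > 0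
    | some (dx, dy) =>
        tocke ++ (PySem.List.pyRange 1 (razdalja_potovanja + 1) 1).map
          (fun i => (x_koordinata + i * dx, y_koordinata + i * dy))
  else tocke

-- ===== PRECONDITION & SPEC =====
-- Pre_ excludes exactly the inputs with a positive distance and a direction string outside the
-- dictionary, on which A raises KeyError (with distance ≤ 0 A's loop body never runs, so any string is fine).
def Pre_odsek (x_koordinata : Int) (y_koordinata : Int) (smerni_znak : String) (razdalja_potovanja : Int) : Prop :=
  razdalja_potovanja ≤ 0 ∨ smerni_znak = "<" ∨ smerni_znak = ">" ∨ smerni_znak = "^" ∨ smerni_znak = "v"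
instance (x_koordinata : Int) (y_koordinata : Int) (smerni_znak : String) (razdalja_potovanja : Int) : Decidable (Pre_odsek x_koordinata y_koordinata smerni_znak razdalja_potovanja) := by unfold Pre_odsek; infer_instance
def pvWitness_odsek : Int × Int × String × Int := (0, 0, "<", 3)

def Spec_odsek (x_koordinata : Int) (y_koordinata : Int) (smerni_znak : String) (razdalja_potovanja : Int) (out : List (Int × Int)) : Prop := out = odsek_alt x_koordinata y_koordinata smerni_znak razdalja_potovanja
instance (x_koordinata : Int) (y_koordinata : Int) (smerni_znak : String) (razdalja_potovanja : Int) (out : List (Int × Int)) : Decidable (Spec_odsek x_koordinata y_koordinata smerni_znak razdalja_potovanja out) := by unfold Spec_odsek; infer_instance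

-- ===== CLAIM (what is proved, stated in full; the proofs are below) =====
def Claim_equal_odsek : Prop := ∀ (x_koordinata : Int) (y_koordinata : Int) (smerni_znak : String) (razdalja_potovanja : Int), Dom_odsek x_koordinata y_koordinata smerni_znak razdalja_potovanja → Pre_odsek x_koordinata y_koordinata smerni_znak razdalja_potovanja → Spec_odsek x_koordinata y_koordinata smerni_znak razdalja_potovanja (odsek x_koordinata y_koordinata smerni_znak razdalja_potovanja)

-- ===== LEMMAS AND PROOFS =====

-- the generic loop, dx dy fixed: closed form of the fold over List.range
theorem loop_eq (dx dy x y : Int) (n : Nat) :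
    ((List.range n).foldl
        (fun (st : Int × Int × List (Int × Int)) (_ : Nat) =>
          (st.1 + dx, st.2.1 + dy, st.2.2 ++ [(st.1 + dx, st.2.1 + dy)]))
        (x, y, [(x, y)]))
      = (x + n * dx, y + n * dy,
         (List.range (n + 1)).map (fun (k : Nat) => (x + (k : Int) * dx, y + (k : Int) * dy))) := by
  induction n with
  | zero => simp
  | succ n ih =>
      rw [List.range_succ, List.foldl_append, ih, List.range_succ (n := n + 1), List.map_append]
      simp only [List.foldl_cons, List.foldl_nil, Prod.mk.injEq, List.map_cons, List.map_nil]
      refine ⟨by push_cast; ring, by push_cast; ring, ?_⟩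
      rw [List.append_cancel_left_eq]
      simp only [List.cons.injEq, and_true, Prod.mk.injEq]
      constructor <;> (push_cast; ring)

theorem korakA_eq (s : String) (dx dy : Int)
    (h : PySem.Dict.get? slovarSmeri s = some (dx, dy)) :
    korakA s = (fun (st : Int × Int × List (Int × Int)) (_ : Int) =>
      (st.1 + dx, st.2.1 + dy, st.2.2 ++ [(st.1 + dx, st.2.1 + dy)])) := by
  funext st i
  simp [korakA, h]

-- A's result in closed form, for a direction string in the dictionary
theorem odsekA_closed (x y r dx dy : Int) (s : String)
    (h : PySem.Dict.get? slovarSmeri s = some (dx, dy)) :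
    odsek x y s r = (PySem.List.pyRange 0 (max r 0 + 1) 1).map
      (fun i => (x + i * dx, y + i * dy)) := by
  unfold odsek
  rw [korakA_eq s dx dy h, PySem.List.pyRange_one, PySem.List.pyRange_one]
  simp only [List.foldl_map, List.map_map, Int.sub_zero]
  have hmax : (max r 0 + 1).toNat = r.toNat + 1 := by omega
  rw [hmax, loop_eq]
  refine List.map_congr_left ?_
  intro k _
  simp

theorem odsek_eq_alt_of_get (x y r dx dy : Int) (s : String)
    (h : PySem.Dict.get? slovarSmeri s = some (dx, dy)) :
    odsek x y s r = odsek_alt x y s r := by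
  rw [odsekA_closed x y r dx dy s h]
  unfold odsek_alt
  rw [h]
  by_cases hr : r > 0
  · rw [if_pos hr, max_eq_left (by omega),
        PySem.List.pyRange_one_cons (by omega : (0 : Int) < r + 1), List.map_cons]
    simp
  · rw [if_neg hr, max_eq_right (by omega),
        PySem.List.pyRange_one_singleton]
    simp

theorem odsek_eq_alt_of_nonpos (x y r : Int) (s : String) (hr : r ≤ 0) :
    odsek x y s r = odsek_alt x y s r := by
  unfold odsek odsek_alt
  rw [PySem.List.pyRange_one_eq_nil hr, if_neg (by omega)]
  simp

theorem odsek_spec : Claim_equal_odsek := by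
  intro x y s r _ hpre
  unfold Spec_odsek
  by_cases hr : r ≤ 0
  · exact odsek_eq_alt_of_nonpos x y r s hr
  · rcases hpre with h | h | h | h | h
    · exact absurd h hr
    all_goals subst h
    · exact odsek_eq_alt_of_get x y r (-1) 0 "<" (by decide)
    · exact odsek_eq_alt_of_get x y r 1 0 ">" (by decide)
    · exact odsek_eq_alt_of_get x y r 0 1 "^" (by decide)
    · exact odsek_eq_alt_of_get x y r 0 (-1) "v" (by decide)
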